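-- pv_equiv track=rewrite | github.com/appudeepika/MountbuleQuestions | 37 array rearrangement.py | zeros_ones
-- ===== SOURCE A (Python) =====
-- def zeros_ones(arr):
--     n=len(arr)
--     count=0
--     odd=[]
--     for i in range(n):
--         if arr[i]==0:
--             arr[count]=arr[i]
--             count+=1
--     while count<n:
--         arr[count]=1
--         count+=1
--     return arr
-- ===== SOURCE B (Python) =====
-- def zeros_ones(arr):
--     c = arr.count(0)
--     arr[:] = [0] * c + [1] * (len(arr) - c)
--     return arr
-- ===== Notes on version B (the rewrite author's own statement) =====
-- stated objective: simpler
-- what changed: Replaces A's two element-writing loops (zero compaction then ones fill) with a single count of the zeros followed by one closed-form slice assignment of the rebuilt array.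
import Mathlib
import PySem

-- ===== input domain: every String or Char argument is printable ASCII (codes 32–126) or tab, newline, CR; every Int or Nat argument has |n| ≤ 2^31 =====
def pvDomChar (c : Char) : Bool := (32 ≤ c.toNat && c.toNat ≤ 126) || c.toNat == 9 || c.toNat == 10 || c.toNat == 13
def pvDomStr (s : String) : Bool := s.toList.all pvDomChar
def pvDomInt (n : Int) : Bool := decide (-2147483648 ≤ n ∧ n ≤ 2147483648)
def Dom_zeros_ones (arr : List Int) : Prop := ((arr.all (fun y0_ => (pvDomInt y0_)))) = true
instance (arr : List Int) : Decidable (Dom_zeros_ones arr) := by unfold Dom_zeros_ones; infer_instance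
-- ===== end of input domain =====

-- B replaces A's two in-place writing loops with count-the-zeros plus one closed-form build (simpler).
-- A mutates its argument in place (B's Python mimics this via slice assignment); the equivalence proved here is about the RETURN value.

-- ===== PORT A =====
-- the 'for i in range(n)' compaction loop: state = (current list, count)
def zerosLoopA (a : List Int) (i count n : Nat) : List Int × Nat :=
  if i < n then
    if a.getD i 0 == 0 then zerosLoopA (a.set count (a.getD i 0)) (i+1) (count+1) n
    else zerosLoopA a (i+1) count n
  else (a, count)
termination_by n - i

-- the 'while count < n' ones-fill loop
def fillOnesA (a : List Int) (count n : Nat) : List Int :=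
  if count < n then fillOnesA (a.set count 1) (count+1) n else a
termination_by n - count

def zeros_ones (arr : List Int) : List Int :=
  let n := arr.length
  let p := zerosLoopA arr 0 0 n
  fillOnesA p.1 p.2 n

-- ===== PORT B =====
def zeros_ones_alt (arr : List Int) : List Int :=
  let c := PySem.List.count arr 0
  List.replicate c 0 ++ List.replicate (arr.length - c) 1

-- ===== PRECONDITION & SPEC =====
def Spec_zeros_ones (arr : List Int) (out : List Int) : Prop := out = zeros_ones_alt arr
instance (arr : List Int) (out : List Int) : Decidable (Spec_zeros_ones arr out) := by unfold Spec_zeros_ones; infer_instance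

-- ===== CLAIM (what is proved, stated in full; the proofs are below) =====
def Claim_equal_zeros_ones : Prop := ∀ (arr : List Int), Dom_zeros_ones arr → Spec_zeros_ones arr (zeros_ones arr)

-- ===== LEMMAS AND PROOFS =====

theorem take_set_succ (a : List Int) (j : Nat) (v : Int) (h : j < a.length) :
    (a.set j v).take (j+1) = a.take j ++ [v] := by
  rw [List.take_add_one]
  simp [List.take_set, List.set_eq_of_length_le, h]

theorem fill_spec (n : Nat) : ∀ (k : Nat) (a : List Int) (count : Nat),
    a.length = n → count ≤ n → n - count = k →
    fillOnesA a count n = a.take count ++ List.replicate (n - count) 1 := by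
  intro k
  induction k with
  | zero =>
    intro a count hl hle hk
    have hcn : count = n := by omega
    rw [fillOnesA]
    simp [hcn, List.take_of_length_le (le_of_eq hl)]
  | succ k ih =>
    intro a count hl hle hk
    have hlt : count < n := by omega
    rw [fillOnesA, if_pos hlt]
    rw [ih (a.set count 1) (count+1) (by simpa using hl) (by omega) (by omega)]
    rw [take_set_succ a count 1 (by omega)]
    have : n - count = (n - (count+1)) + 1 := by omega
    rw [this, List.replicate_succ, List.append_assoc]
    rfl

theorem loop_spec (n : Nat) : ∀ (k : Nat) (a : List Int) (i count : Nat),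
    a.length = n → count ≤ i → i ≤ n → n - i = k →
    a.take count = List.replicate count 0 →
    fillOnesA (zerosLoopA a i count n).1 (zerosLoopA a i count n).2 n
      = List.replicate (count + (a.drop i).count 0) 0
        ++ List.replicate (n - (count + (a.drop i).count 0)) 1 := by
  intro k
  induction k with
  | zero =>
    intro a i count hl hci hin hk htake
    have hi : i = n := by omega
    rw [zerosLoopA]
    simp only [hi, lt_irrefl, if_false]
    rw [fill_spec n (n - count) a count hl (by omega) rfl]
    have : a.drop n = [] := List.drop_of_length_le (le_of_eq hl)
    simp [this, htake]
  | succ k ih =>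
    intro a i count hl hci hin hk htake
    have hlt : i < n := by omega
    have hia : i < a.length := by omega
    have hca : count < a.length := by omega
    have hget : a[i]? = some a[i] := List.getElem?_eq_getElem hia
    have hdrop : a.drop i = a[i] :: a.drop (i+1) := List.drop_eq_getElem_cons hia
    rw [zerosLoopA, if_pos hlt]
    by_cases h0 : a[i] = 0
    · rw [if_pos (by simp [hget, h0])]
      rw [show a.getD i 0 = a[i] by simp [List.getD_eq_getElem?_getD, hget], h0]
      have hdropset : (a.set count 0).drop (i+1) = a.drop (i+1) :=
        List.drop_set_of_lt (hnm := by omega)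
      rw [ih (a.set count 0) (i+1) (count+1) (by simpa using hl) (by omega) (by omega) (by omega)
          (by rw [take_set_succ a count 0 hca, htake]; simp [List.replicate_succ'])]
      rw [hdropset, hdrop]
      simp [h0]
      ring_nf
    · rw [if_neg (by simp [hget, h0])]
      rw [ih a (i+1) count hl (by omega) (by omega) (by omega) htake]
      have hc : List.count 0 (List.drop i a) = List.count 0 (List.drop (i+1) a) := by
        rw [hdrop, List.count_cons]
        simp [beq_iff_eq, h0]
      rw [hc]

-- ===== VERDICT (by name: the statement is the Claim_ definition above) =====
theorem zeros_ones_spec : Claim_equal_zeros_ones := by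
  intro arr _
  unfold Spec_zeros_ones zeros_ones zeros_ones_alt
  rw [loop_spec arr.length (arr.length) arr 0 0 rfl (le_refl 0) (Nat.zero_le _) (by omega) (by simp)]
  simp [PySem.List.count_eq]
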